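-- pv_equiv track=rewrite | github.com/aaron6347/CPT244-Asn2 | venv/tetsting5.py | sc02
-- ===== SOURCE A (Python) =====
-- def sc02(staff_timeslot):
--     """check staff with number of days"""
--     score = 0
--     for _, timeslot in staff_timeslot.items():  # traverse and check each staff
--         day_counter = {'Monday': 0, 'Tuesday': 0, 'Wednesday': 0, 'Thursday': 0, 'Friday': 0}   #to store each day's presentation
--         for time in timeslot:   #traverse and check each timeslot
--             if 0 < time < 61:   #increment counter by distribute timeslot into corresponding days
--                 day_counter["Monday"] += 1
--             elif 60 < time < 121:
--                 day_counter["Tuesday"] += 1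
--             elif 120 < time < 181:
--                 day_counter["Wednesday"] += 1
--             elif 180 < time < 241:
--                 day_counter["Thursday"] += 1
--             else:
--                 day_counter["Friday"] += 1
--         for _ in range(2):  #find the 2 lowest presentation days to use as penalty
--             min_val = min(day_counter.values())
--             min_day = min(day_counter.keys(), key=lambda x: day_counter[x])
--             score += min_val * 10   #2 lowest presentation days counter value will be used as penalty
--             day_counter.pop(min_day)    #pop out the lowest presentation day to find 1st and 2nd lowest
--     return score
-- ===== SOURCE B (Python) =====
-- def sc02(staff_timeslot):
--     """check staff with number of days"""
--     total = 0
--     for timeslot in staff_timeslot.values():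
--         mo = tu = we = th = fr = 0
--         for time in timeslot:
--             if 0 < time < 61:
--                 mo += 1
--             elif 60 < time < 121:
--                 tu += 1
--             elif 120 < time < 181:
--                 we += 1
--             elif 180 < time < 241:
--                 th += 1
--             else:
--                 fr += 1
--         total += sum(sorted((mo, tu, we, th, fr))[:2]) * 10
--     return total
-- ===== Notes on version B (the rewrite author's own statement) =====
-- stated objective: simpler
-- what changed: The two-iteration min+argmin+pop selection over a day dict is replaced by five plain integer counters and summing the two smallest via sorted(counts)[:2], removing the dict and the repeated minimum scans with removal.
import Mathlib
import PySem

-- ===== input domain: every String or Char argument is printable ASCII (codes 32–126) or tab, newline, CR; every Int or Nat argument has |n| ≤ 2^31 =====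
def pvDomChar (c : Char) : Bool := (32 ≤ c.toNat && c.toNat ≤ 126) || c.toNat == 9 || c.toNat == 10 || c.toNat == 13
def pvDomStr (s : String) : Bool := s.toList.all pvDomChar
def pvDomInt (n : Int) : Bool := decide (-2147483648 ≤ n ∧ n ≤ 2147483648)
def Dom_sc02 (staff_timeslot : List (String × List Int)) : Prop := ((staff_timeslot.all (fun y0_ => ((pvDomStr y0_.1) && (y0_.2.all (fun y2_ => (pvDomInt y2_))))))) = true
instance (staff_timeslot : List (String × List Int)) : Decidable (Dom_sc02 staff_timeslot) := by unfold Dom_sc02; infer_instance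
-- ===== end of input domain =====

-- B replaces A's two-round min/argmin/pop selection on a day dict by five plain counters and
-- sum(sorted(counts)[:2]) * 10; objective: simpler selection, same bucketing.

-- ===== PORT A =====
-- min()/pop on the day dict never see an empty dict (5, then 4 keys), so the Option defaults
-- of min? (getD 0 / getD "") are never used; Dict.erase is .pop with the value discarded.
def sc02 (staff_timeslot : List (String × List Int)) : Int :=
  (staff_timeslot.foldl (fun score st =>
    let day_counter : PySem.Dict String Int :=
      PySem.Dict.mk [("Monday",0),("Tuesday",0),("Wednesday",0),("Thursday",0),("Friday",0)]
    let day_counter := st.2.foldl (fun dc time =>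
      if 0 < time ∧ time < 61 then dc.modify "Monday" 0 (· + 1)
      else if 60 < time ∧ time < 121 then dc.modify "Tuesday" 0 (· + 1)
      else if 120 < time ∧ time < 181 then dc.modify "Wednesday" 0 (· + 1)
      else if 180 < time ∧ time < 241 then dc.modify "Thursday" 0 (· + 1)
      else dc.modify "Friday" 0 (· + 1)) day_counter
    ((PySem.List.pyRange 0 2 1).foldl (fun st2 _ =>
      let min_val := (PySem.List.min? st2.2.values (fun v => v)).getD 0
      let min_day := (PySem.List.min? st2.2.keys (fun k => st2.2.getD k 0)).getD ""
      (st2.1 + min_val * 10, st2.2.erase min_day)) (score, day_counter)).1) 0)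

-- ===== PORT B =====
def sc02_alt (staff_timeslot : List (String × List Int)) : Int :=
  staff_timeslot.foldl (fun total st =>
    let c := st.2.foldl (fun c time =>
      if 0 < time ∧ time < 61 then (c.1 + 1, c.2.1, c.2.2.1, c.2.2.2.1, c.2.2.2.2)
      else if 60 < time ∧ time < 121 then (c.1, c.2.1 + 1, c.2.2.1, c.2.2.2.1, c.2.2.2.2)
      else if 120 < time ∧ time < 181 then (c.1, c.2.1, c.2.2.1 + 1, c.2.2.2.1, c.2.2.2.2)
      else if 180 < time ∧ time < 241 then (c.1, c.2.1, c.2.2.1, c.2.2.2.1 + 1, c.2.2.2.2)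
      else (c.1, c.2.1, c.2.2.1, c.2.2.2.1, c.2.2.2.2 + 1))
      (((0:Int)),((0:Int)),((0:Int)),((0:Int)),((0:Int)))
    total + ((PySem.List.sorted [c.1, c.2.1, c.2.2.1, c.2.2.2.1, c.2.2.2.2] (fun v => v) false).take 2).sum * 10) 0

-- ===== PRECONDITION & SPEC =====
def Spec_sc02 (staff_timeslot : List (String × List Int)) (out : Int) : Prop := out = sc02_alt staff_timeslot
instance (staff_timeslot : List (String × List Int)) (out : Int) : Decidable (Spec_sc02 staff_timeslot out) := by unfold Spec_sc02; infer_instance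

-- ===== CLAIM (what is proved, stated in full; the proofs are below) =====
def Claim_equal_sc02 : Prop := ∀ (staff_timeslot : List (String × List Int)), Dom_sc02 staff_timeslot → Spec_sc02 staff_timeslot (sc02 staff_timeslot)

-- ===== LEMMAS AND PROOFS =====

-- proof-side copies of the two inner step functions and the five-day dict shape
def pvStepA (dc : PySem.Dict String Int) (time : Int) : PySem.Dict String Int :=
  if 0 < time ∧ time < 61 then dc.modify "Monday" 0 (· + 1)
  else if 60 < time ∧ time < 121 then dc.modify "Tuesday" 0 (· + 1)
  else if 120 < time ∧ time < 181 then dc.modify "Wednesday" 0 (· + 1)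
  else if 180 < time ∧ time < 241 then dc.modify "Thursday" 0 (· + 1)
  else dc.modify "Friday" 0 (· + 1)

def pvStepB (c : Int × Int × Int × Int × Int) (time : Int) : Int × Int × Int × Int × Int :=
  if 0 < time ∧ time < 61 then (c.1 + 1, c.2.1, c.2.2.1, c.2.2.2.1, c.2.2.2.2)
  else if 60 < time ∧ time < 121 then (c.1, c.2.1 + 1, c.2.2.1, c.2.2.2.1, c.2.2.2.2)
  else if 120 < time ∧ time < 181 then (c.1, c.2.1, c.2.2.1 + 1, c.2.2.2.1, c.2.2.2.2)
  else if 180 < time ∧ time < 241 then (c.1, c.2.1, c.2.2.1, c.2.2.2.1 + 1, c.2.2.2.2)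
  else (c.1, c.2.1, c.2.2.1, c.2.2.2.1, c.2.2.2.2 + 1)

def pvDictOf (a b c d e : Int) : PySem.Dict String Int :=
  PySem.Dict.mk [("Monday",a),("Tuesday",b),("Wednesday",c),("Thursday",d),("Friday",e)]

theorem pvDictOf_keys (a b c d e : Int) :
    (pvDictOf a b c d e).keys = ["Monday","Tuesday","Wednesday","Thursday","Friday"] := rfl

theorem pvDictOf_items_length (a b c d e : Int) : (pvDictOf a b c d e).items.length = 5 := rfl

def pvRound (st : Int × PySem.Dict String Int) : Int × PySem.Dict String Int :=
  (st.1 + ((PySem.List.min? st.2.values (fun v => v)).getD 0) * 10,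
   st.2.erase ((PySem.List.min? st.2.keys (fun k => st.2.getD k 0)).getD ""))

-- the fold of A's min() loop body, starting from `some m`, yields the first extremal element
theorem pv_minfold_spec {α : Type} (key : α → Int) :
    ∀ (xs : List α) (m m' : α),
      List.foldl (fun acc x => match acc with
        | none => some x
        | some m => if key x < key m then some x else some m) (some m) xs = some m' →
      (m' = m ∧ ∀ y ∈ xs, key m ≤ key y) ∨
      (∃ l r, xs = l ++ m' :: r ∧ key m' < key m ∧ (∀ y ∈ l, key m' < key y) ∧ (∀ y ∈ r, key m' ≤ key y)) := by
  intro xs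
  induction xs with
  | nil => intro m m' h; simp at h; exact Or.inl ⟨h.symm, by simp⟩
  | cons x t ih =>
    intro m m' h
    simp only [List.foldl] at h
    by_cases hx : key x < key m
    · rw [if_pos hx] at h
      rcases ih x m' h with ⟨rfl, hall⟩ | ⟨l, r, rfl, hlt, hl, hr⟩
      · exact Or.inr ⟨[], t, by simp, hx, by simp, hall⟩
      · refine Or.inr ⟨x :: l, r, by simp, lt_trans hlt hx, ?_, hr⟩
        intro y hy
        rcases List.mem_cons.mp hy with rfl | hy
        · exact hlt
        · exact hl y hy
    · rw [if_neg hx] at h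
      rcases ih m m' h with ⟨rfl, hall⟩ | ⟨l, r, rfl, hlt, hl, hr⟩
      · refine Or.inl ⟨rfl, ?_⟩
        intro y hy
        rcases List.mem_cons.mp hy with rfl | hy
        · exact le_of_not_gt hx
        · exact hall y hy
      · refine Or.inr ⟨x :: l, r, by simp, hlt, ?_, hr⟩
        intro y hy
        rcases List.mem_cons.mp hy with rfl | hy
        · exact lt_of_lt_of_le hlt (le_of_not_gt hx)
        · exact hl y hy

theorem pv_min?_spec {α : Type} (key : α → Int) (xs : List α) (m' : α)
    (h : PySem.List.min? xs key = some m') :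
    ∃ l r, xs = l ++ m' :: r ∧ (∀ y ∈ l, key m' < key y) ∧ (∀ y ∈ r, key m' ≤ key y) := by
  cases xs with
  | nil => simp [PySem.List.min?] at h
  | cons p ps =>
    simp only [PySem.List.min?, List.foldl] at h
    rcases pv_minfold_spec key ps p m' h with ⟨rfl, hall⟩ | ⟨l, r, rfl, _, hl, hr⟩
    · exact ⟨[], ps, rfl, by simp, hall⟩
    · refine ⟨p :: l, r, rfl, ?_, hr⟩
      intro y hy
      rcases List.mem_cons.mp hy with rfl | hy
      · assumption
      · exact hl y hy

theorem pv_min?_map {α β : Type} (f : α → β) (key : β → Int) (xs : List α) :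
    PySem.List.min? (xs.map f) key = (PySem.List.min? xs (fun x => key (f x))).map f := by
  simp only [PySem.List.min?, List.foldl_map]
  have aux : ∀ (l : List α) (acc : Option α),
      List.foldl (fun acc x => match acc with
        | none => some (f x)
        | some m => if key (f x) < key m then some (f x) else some m) (acc.map f) l =
      (List.foldl (fun acc x => match acc with
        | none => some x
        | some m => if key (f x) < key (f m) then some x else some m) acc l).map f := by
    intro l
    induction l with
    | nil => intro acc; rfl
    | cons x t ih =>
      intro acc
      cases acc with
      | none => simpa using ih (some x)
      | some m =>
        by_cases hc : key (f x) < key (f m)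
        · simpa [hc] using ih (some x)
        · simpa [hc] using ih (some m)
  simpa using aux xs none

theorem pv_min?_congr {α : Type} (xs : List α) (k1 k2 : α → Int) (h : ∀ x ∈ xs, k1 x = k2 x) :
    PySem.List.min? xs k1 = PySem.List.min? xs k2 := by
  cases xs with
  | nil => rfl
  | cons p ps =>
    simp only [PySem.List.min?, List.foldl]
    have aux : ∀ (l : List α) (m : α), k1 m = k2 m → (∀ x ∈ l, k1 x = k2 x) →
        List.foldl (fun acc x => match acc with
          | none => some x
          | some m => if k1 x < k1 m then some x else some m) (some m) l =
        List.foldl (fun acc x => match acc with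
          | none => some x
          | some m => if k2 x < k2 m then some x else some m) (some m) l := by
      intro l
      induction l with
      | nil => intros; rfl
      | cons x t ih =>
        intro m hm hl
        have hx : k1 x = k2 x := hl x (by simp)
        have ht : ∀ y ∈ t, k1 y = k2 y := fun y hy => hl y (by simp [hy])
        simp only [List.foldl, hx, hm]
        by_cases hc : k2 x < k2 m
        · rw [if_pos hc]; exact ih x hx ht
        · rw [if_neg hc]; exact ih m hm ht
    exact aux ps p (h p (by simp)) (fun x hx => h x (by simp [hx]))

-- one round of A's selection loop: adds 10 × (the minimum value) and removes exactly
-- the entry holding the first occurrence of that minimum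
theorem pvRound_spec (s : Int) (d : PySem.Dict String Int)
    (hnd : d.keys.Nodup) (hne : d.items ≠ []) :
    ∃ m1 d', pvRound (s, d) = (s + m1 * 10, d') ∧
      m1 ∈ d.values ∧ (∀ y ∈ d.values, m1 ≤ y) ∧
      d'.values = d.values.erase m1 ∧ d'.keys.Nodup ∧ d'.items.length + 1 = d.items.length := by
  obtain ⟨p0, hmin⟩ : ∃ p0, PySem.List.min? d.items (fun p => p.2) = some p0 := by
    cases hm : PySem.List.min? d.items (fun p => p.2) with
    | none => exact absurd ((PySem.List.min?_eq_none_iff d.items (fun p => p.2)).mp hm) hne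
    | some p0 => exact ⟨p0, rfl⟩
  obtain ⟨l, r, hitems, hl, hr⟩ := pv_min?_spec _ _ _ hmin
  -- min over the values list returns the minimum value p0.2
  have hvals : PySem.List.min? d.values (fun v => v) = some p0.2 := by
    have : PySem.List.min? (d.items.map (fun p => p.2)) (fun v => v)
        = (PySem.List.min? d.items (fun p => (fun v => v) ((fun p : String × Int => p.2) p))).map (fun p : String × Int => p.2) :=
      pv_min?_map (fun p => p.2) (fun v => v) d.items
    simpa [PySem.Dict.values, hmin] using this
  -- min over the keys (keyed by getD) returns the key p0.1
  have hkeys : PySem.List.min? d.keys (fun k => d.getD k 0) = some p0.1 := by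
    have h1 : PySem.List.min? (d.items.map (fun p => p.1)) (fun k => d.getD k 0)
        = (PySem.List.min? d.items (fun p => d.getD p.1 0)).map (fun p : String × Int => p.1) :=
      pv_min?_map (fun p => p.1) (fun k => d.getD k 0) d.items
    have h2 : PySem.List.min? d.items (fun p => d.getD p.1 0)
        = PySem.List.min? d.items (fun p => p.2) := by
      apply pv_min?_congr
      intro p hp
      exact PySem.Dict.getD_of_mem_items d (by cases p; exact hp) hnd 0
    simp [PySem.Dict.keys, h1, h2, hmin]
  -- the erase removes exactly the entry p0
  have hk_nodup : (l.map (fun p : String × Int => p.1) ++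
      p0.1 :: r.map (fun p : String × Int => p.1)).Nodup := by
    have := hnd; rw [PySem.Dict.keys, hitems] at this; simpa using this
  obtain ⟨hknl', hknr', hdisj⟩ := List.nodup_append.mp hk_nodup
  have hknl : p0.1 ∉ l.map (fun p : String × Int => p.1) := fun hmem =>
    hdisj _ hmem p0.1 (by simp) rfl
  have hknr : p0.1 ∉ r.map (fun p : String × Int => p.1) := (List.nodup_cons.mp hknr').1
  have herase : (d.erase p0.1).items = l ++ r := by
    rw [PySem.Dict.erase, hitems, List.filter_append]
    have hfl : l.filter (fun p => !p.1 == p0.1) = l := by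
      apply List.filter_eq_self.mpr
      intro p hp
      have : p.1 ≠ p0.1 := fun hc => hknl (by rw [← hc]; exact List.mem_map_of_mem hp)
      simpa using this
    have hfr : (p0 :: r).filter (fun p => !p.1 == p0.1) = r := by
      rw [List.filter_cons_of_neg (by simp)]
      apply List.filter_eq_self.mpr
      intro p hp
      have : p.1 ≠ p0.1 := fun hc => hknr (by rw [← hc]; exact List.mem_map_of_mem hp)
      simpa using this
    rw [hfl, hfr]
  refine ⟨p0.2, d.erase p0.1, ?_, ?_, ?_, ?_, ?_, ?_⟩
  · simp [pvRound, hvals, hkeys]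
  · rw [PySem.Dict.values, hitems]; simp
  · intro y hy
    rw [PySem.Dict.values, hitems] at hy
    simp only [List.map_append, List.map_cons, List.mem_append, List.mem_cons, List.mem_map] at hy
    rcases hy with ⟨q, hq, rfl⟩ | (rfl | ⟨q, hq, rfl⟩)
    · exact le_of_lt (hl q hq)
    · exact le_refl _
    · exact hr q hq
  · rw [PySem.Dict.values, herase, PySem.Dict.values, hitems]
    simp only [List.map_append, List.map_cons]
    have hnotmem : p0.2 ∉ l.map (fun p : String × Int => p.2) := by
      intro hmem
      obtain ⟨q, hq, hq2⟩ := List.mem_map.mp hmem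
      exact absurd hq2 (ne_of_gt (hl q hq))
    rw [List.erase_append_right _ hnotmem, List.erase_cons_head]
  · have : (d.erase p0.1).keys.Sublist d.keys := by
      rw [PySem.Dict.keys, PySem.Dict.keys, herase, hitems]
      exact List.Sublist.map _ (List.Sublist.append_left (List.sublist_cons_self p0 r) l)
    exact hnd.sublist this
  · rw [herase, hitems]; simp [List.length_append]; omega

-- the two smallest entries of a sorted list are the minimum and the minimum after erasing it
theorem pv_take2_sorted (xs : List Int) (m1 m2 : Int) (h2 : 2 ≤ xs.length)
    (hm1 : m1 ∈ xs) (hmin1 : ∀ y ∈ xs, m1 ≤ y)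
    (hm2 : m2 ∈ xs.erase m1) (hmin2 : ∀ y ∈ xs.erase m1, m2 ≤ y) :
    ((PySem.List.sorted xs (fun v => v) false).take 2).sum = m1 + m2 := by
  have hperm : (PySem.List.sorted xs (fun v => v) false).Perm xs := PySem.List.sorted_perm xs _ _
  have hlen : 2 ≤ (PySem.List.sorted xs (fun v => v) false).length := by
    rw [hperm.length_eq]; exact h2
  obtain ⟨s0, s1, t, hs⟩ : ∃ s0 s1 t, PySem.List.sorted xs (fun v => v) false = s0 :: s1 :: t := by
    cases hsort : PySem.List.sorted xs (fun v => v) false with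
    | nil => rw [hsort] at hlen; simp at hlen
    | cons s0 tl =>
      cases tl with
      | nil => rw [hsort] at hlen; simp at hlen
      | cons s1 t => exact ⟨s0, s1, t, rfl⟩
  have hpair : (PySem.List.sorted xs (fun v => v) false).Pairwise (fun a b => a ≤ b) := by
    simpa using PySem.List.sorted_pairwise xs (fun v => v)
  rw [hs] at hperm hpair
  have hall0 : ∀ b ∈ s1 :: t, s0 ≤ b := (List.pairwise_cons.mp hpair).1
  have hs0 : s0 = m1 := by
    have ha : m1 ≤ s0 := hmin1 s0 (hperm.mem_iff.mp (by simp))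
    have hb : s0 ≤ m1 := by
      rcases List.mem_cons.mp (hperm.mem_iff.mpr hm1) with rfl | hm
      · exact le_refl _
      · exact hall0 m1 hm
    exact le_antisymm hb ha
  subst hs0
  have hperm2 : (s1 :: t).Perm (xs.erase s0) := by
    have := hperm.erase s0
    rwa [List.erase_cons_head] at this
  have hpair2 : (s1 :: t).Pairwise (fun a b => a ≤ b) := (List.pairwise_cons.mp hpair).2
  have hs1 : s1 = m2 := by
    have ha : m2 ≤ s1 := hmin2 s1 (hperm2.mem_iff.mp (by simp))
    have hb : s1 ≤ m2 := by
      rcases List.mem_cons.mp (hperm2.mem_iff.mpr hm2) with rfl | hm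
      · exact le_refl _
      · exact (List.pairwise_cons.mp hpair2).1 m2 hm
    exact le_antisymm hb ha
  rw [hs, hs1]
  simp

-- the bucketing loops agree: A's dict fold is B's five-counter fold in dict clothing
theorem pv_bucket : ∀ (ts : List Int) (a b c d e : Int),
    ts.foldl pvStepA (pvDictOf a b c d e) =
      (fun q : Int × Int × Int × Int × Int => pvDictOf q.1 q.2.1 q.2.2.1 q.2.2.2.1 q.2.2.2.2)
        (ts.foldl pvStepB (a, b, c, d, e)) := by
  intro ts
  induction ts with
  | nil => intros; rfl
  | cons t ts ih =>
    intro a b c d e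
    have hstep : pvStepA (pvDictOf a b c d e) t =
        (fun q : Int × Int × Int × Int × Int => pvDictOf q.1 q.2.1 q.2.2.1 q.2.2.2.1 q.2.2.2.2)
          (pvStepB (a, b, c, d, e) t) := by
      unfold pvStepA pvStepB
      by_cases h1 : 0 < t ∧ t < 61
      · simp only [if_pos h1]; rfl
      by_cases h2 : 60 < t ∧ t < 121
      · simp only [if_neg h1, if_pos h2]; rfl
      by_cases h3 : 120 < t ∧ t < 181
      · simp only [if_neg h1, if_neg h2, if_pos h3]; rfl
      by_cases h4 : 180 < t ∧ t < 241
      · simp only [if_neg h1, if_neg h2, if_neg h3, if_pos h4]; rfl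
      · simp only [if_neg h1, if_neg h2, if_neg h3, if_neg h4]; rfl
    simp only [List.foldl, hstep]
    exact ih _ _ _ _ _

-- A's per-staff selection on any five-day dict equals B's sorted-take-2 penalty
theorem pv_selA (s : Int) (d : PySem.Dict String Int) (hnd : d.keys.Nodup) (h2 : 2 ≤ d.items.length) :
    (pvRound (pvRound (s, d))).1 = s + ((PySem.List.sorted d.values (fun v => v) false).take 2).sum * 10 := by
  obtain ⟨m1, d', hr1, hm1, hmin1, hv1, hnd1, hlen1⟩ :=
    pvRound_spec s d hnd (by intro h; rw [h] at h2; simp at h2)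
  obtain ⟨m2, d'', hr2, hm2, hmin2, _, _, _⟩ :=
    pvRound_spec (s + m1 * 10) d' hnd1 (by intro h; rw [h] at hlen1; simp at hlen1; omega)
  rw [hr1, hr2]
  rw [pv_take2_sorted d.values m1 m2 (by simpa [PySem.Dict.values] using h2) hm1 hmin1
    (hv1 ▸ hm2) (hv1 ▸ hmin2)]
  ring

-- assembling the per-staff bodies and the outer fold
theorem pv_main : ∀ (l : List (String × List Int)) (acc : Int),
    (l.foldl (fun score st =>
      let day_counter : PySem.Dict String Int :=
        PySem.Dict.mk [("Monday",0),("Tuesday",0),("Wednesday",0),("Thursday",0),("Friday",0)]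
      let day_counter := st.2.foldl (fun dc time =>
        if 0 < time ∧ time < 61 then dc.modify "Monday" 0 (· + 1)
        else if 60 < time ∧ time < 121 then dc.modify "Tuesday" 0 (· + 1)
        else if 120 < time ∧ time < 181 then dc.modify "Wednesday" 0 (· + 1)
        else if 180 < time ∧ time < 241 then dc.modify "Thursday" 0 (· + 1)
        else dc.modify "Friday" 0 (· + 1)) day_counter
      ((PySem.List.pyRange 0 2 1).foldl (fun st2 _ =>
        let min_val := (PySem.List.min? st2.2.values (fun v => v)).getD 0
        let min_day := (PySem.List.min? st2.2.keys (fun k => st2.2.getD k 0)).getD ""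
        (st2.1 + min_val * 10, st2.2.erase min_day)) (score, day_counter)).1) acc) =
    (l.foldl (fun total st =>
      let c := st.2.foldl (fun c time =>
        if 0 < time ∧ time < 61 then (c.1 + 1, c.2.1, c.2.2.1, c.2.2.2.1, c.2.2.2.2)
        else if 60 < time ∧ time < 121 then (c.1, c.2.1 + 1, c.2.2.1, c.2.2.2.1, c.2.2.2.2)
        else if 120 < time ∧ time < 181 then (c.1, c.2.1, c.2.2.1 + 1, c.2.2.2.1, c.2.2.2.2)
        else if 180 < time ∧ time < 241 then (c.1, c.2.1, c.2.2.1, c.2.2.2.1 + 1, c.2.2.2.2)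
        else (c.1, c.2.1, c.2.2.1, c.2.2.2.1, c.2.2.2.2 + 1))
        (((0:Int)),((0:Int)),((0:Int)),((0:Int)),((0:Int)))
      total + ((PySem.List.sorted [c.1, c.2.1, c.2.2.1, c.2.2.2.1, c.2.2.2.2] (fun v => v) false).take 2).sum * 10) acc) := by
  intro l
  induction l with
  | nil => intro acc; rfl
  | cons st rest ih =>
    intro acc
    simp only [List.foldl]
    rw [← ih]
    congr 1
    -- per-staff body equality
    show ((PySem.List.pyRange 0 2 1).foldl _ (acc, st.2.foldl pvStepA (pvDictOf 0 0 0 0 0))).1 = _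
    rw [pv_bucket st.2 0 0 0 0 0]
    set q := st.2.foldl pvStepB (0, 0, 0, 0, 0) with hq
    have htwo : ((PySem.List.pyRange 0 2 1).foldl (fun st2 (_ : Int) =>
        (st2.1 + ((PySem.List.min? st2.2.values (fun v => v)).getD 0) * 10,
         st2.2.erase ((PySem.List.min? st2.2.keys (fun k => st2.2.getD k 0)).getD "")))
        (acc, pvDictOf q.1 q.2.1 q.2.2.1 q.2.2.2.1 q.2.2.2.2)) =
        pvRound (pvRound (acc, pvDictOf q.1 q.2.1 q.2.2.1 q.2.2.2.1 q.2.2.2.2)) := by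
      rw [(by decide : PySem.List.pyRange 0 2 1 = [0, 1])]
      rfl
    rw [htwo, pv_selA acc _ (by rw [pvDictOf_keys]; decide) (by rw [pvDictOf_items_length]; omega)]
    rfl

-- ===== VERDICT (by name: the statement is the Claim_ definition above) =====
theorem sc02_spec : Claim_equal_sc02 := by
  intro staff_timeslot _
  show sc02 staff_timeslot = sc02_alt staff_timeslot
  exact pv_main staff_timeslot 0
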